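-- pv_equiv track=rewrite | github.com/whotookmylogin/FF-Domination | backend/src/ai/expert_draft_agent.py | _assess_positional_needs
-- ===== SOURCE A (Python) =====
-- from typing import Dict, List, Any, Optional, Tuple
--
-- def _assess_positional_needs(current_roster: List[Dict[str, Any]],
--                            league_settings: Dict[str, Any]) -> Dict[str, int]:
--     """Assess positional needs based on current roster"""
--
--     # Count current positions
--     position_counts = {}
--     for player in current_roster:
--         pos = player.get('position', 'UNKNOWN')
--         position_counts[pos] = position_counts.get(pos, 0) + 1
--
--     # Standard roster requirements
--     position_needs = {
--         'QB': 2,    # 1 starter + 1 backup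
--         'RB': 4,    # 2-3 starters + handcuffs
--         'WR': 5,    # 2-3 starters + depth
--         'TE': 2,    # 1 starter + 1 backup
--         'K': 1,     # 1 starter
--         'DEF': 1    # 1 starter
--     }
--
--     # Calculate remaining needs
--     remaining_needs = {}
--     for pos, need in position_needs.items():
--         current = position_counts.get(pos, 0)
--         remaining_needs[pos] = max(0, need - current)
--
--     return remaining_needs
-- ===== SOURCE B (Python) =====
-- def _assess_positional_needs(current_roster, league_settings):
--     """Assess positional needs: start from the quota table and spend quotas in one pass"""
--     remaining_needs = {'QB': 2, 'RB': 4, 'WR': 5, 'TE': 2, 'K': 1, 'DEF': 1}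
--     for player in current_roster:
--         pos = player.get('position', 'UNKNOWN')
--         if pos in remaining_needs and remaining_needs[pos] > 0:
--             remaining_needs[pos] -= 1
--     return remaining_needs
-- ===== Notes on version B (the rewrite author's own statement) =====
-- stated objective: alternative
-- what changed: B replaces A's two-stage count-then-subtract pipeline (build position_counts, then map max(0, need-count) over the quota table) with a single pass that starts from the quota dict and spends quotas: each player decrements his position's remaining need unless it is already 0.
import Mathlib
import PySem

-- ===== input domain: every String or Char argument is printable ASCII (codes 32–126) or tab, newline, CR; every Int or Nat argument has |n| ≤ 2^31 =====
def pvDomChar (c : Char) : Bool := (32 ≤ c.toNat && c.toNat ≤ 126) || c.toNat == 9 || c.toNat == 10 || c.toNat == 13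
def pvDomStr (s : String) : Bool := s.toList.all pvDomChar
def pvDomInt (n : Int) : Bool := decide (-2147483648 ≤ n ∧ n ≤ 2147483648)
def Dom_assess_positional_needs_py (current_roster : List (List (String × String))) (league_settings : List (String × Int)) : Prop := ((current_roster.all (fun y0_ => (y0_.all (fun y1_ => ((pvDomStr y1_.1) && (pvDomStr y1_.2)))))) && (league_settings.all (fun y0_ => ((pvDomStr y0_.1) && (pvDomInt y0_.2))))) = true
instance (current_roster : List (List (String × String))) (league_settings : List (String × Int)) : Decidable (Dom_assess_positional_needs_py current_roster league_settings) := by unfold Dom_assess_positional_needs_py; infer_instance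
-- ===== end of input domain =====

-- B replaces A's count-then-subtract pipeline with a single pass that starts from the
-- quota dict and decrements a position's remaining need (never below 0) per player.

-- shared helper: player.get('position', 'UNKNOWN') on the association-list player dict
def pvPlayerPos (player : List (String × String)) : String :=
  (PySem.Dict.mk player).getD "position" "UNKNOWN"

-- the literal position_needs mapping (its items in insertion order)
def pvNeedsList : List (String × Int) :=
  [("QB", 2), ("RB", 4), ("WR", 5), ("TE", 2), ("K", 1), ("DEF", 1)]

-- ===== PORT A =====
def assess_positional_needs_py (current_roster : List (List (String × String))) (league_settings : List (String × Int)) : List (String × Int) :=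
  -- position_counts built by the first loop
  let position_counts : PySem.Dict String Int :=
    current_roster.foldl
      (fun d player => d.insert (pvPlayerPos player) (d.getD (pvPlayerPos player) 0 + 1))
      PySem.Dict.empty
  -- remaining_needs built by the second loop over position_needs.items()
  (pvNeedsList.foldl
    (fun d pn => d.insert pn.1 (max 0 (pn.2 - position_counts.getD pn.1 0)))
    PySem.Dict.empty).items

-- ===== PORT B =====
-- loop body of B: 'if pos in remaining_needs and remaining_needs[pos] > 0: remaining_needs[pos] -= 1'
def pvDecStep (d : PySem.Dict String Int) (pos : String) : PySem.Dict String Int :=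
  if d.contains pos && decide (0 < d.getD pos 0) then d.insert pos (d.getD pos 0 - 1) else d

def assess_positional_needs_py_alt (current_roster : List (List (String × String))) (league_settings : List (String × Int)) : List (String × Int) :=
  (current_roster.foldl (fun d player => pvDecStep d (pvPlayerPos player))
    (PySem.Dict.ofList pvNeedsList)).items

-- ===== PRECONDITION & SPEC =====
def Spec_assess_positional_needs_py (current_roster : List (List (String × String))) (league_settings : List (String × Int)) (out : List (String × Int)) : Prop := out = assess_positional_needs_py_alt current_roster league_settings
instance (current_roster : List (List (String × String))) (league_settings : List (String × Int)) (out : List (String × Int)) : Decidable (Spec_assess_positional_needs_py current_roster league_settings out) := by unfold Spec_assess_positional_needs_py; infer_instance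

-- ===== CLAIM (what is proved, stated in full; the proofs are below) =====
def Claim_equal_assess_positional_needs_py : Prop := ∀ (current_roster : List (List (String × String))) (league_settings : List (String × Int)), Dom_assess_positional_needs_py current_roster league_settings → Spec_assess_positional_needs_py current_roster league_settings (assess_positional_needs_py current_roster league_settings)

-- ===== LEMMAS AND PROOFS =====

-- A's counting loop is a counter: its lookup at pos counts the players with that position.
theorem pv_counts_getD (roster : List (List (String × String))) (pos : String) :
    (roster.foldl
      (fun d player => d.insert (pvPlayerPos player) (d.getD (pvPlayerPos player) 0 + 1))
      PySem.Dict.empty).getD pos 0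
      = ((roster.map pvPlayerPos).count pos : Int) := by
  rw [← List.foldl_map (f := pvPlayerPos)
        (g := fun (d : PySem.Dict String Int) x => d.insert x (d.getD x 0 + 1))]
  rw [PySem.Dict.getD_foldl_insert_add_one, PySem.Dict.getD_empty, zero_add]

-- B's decrement loop, read through the list of position strings: every entry's final
-- value is its initial (nonnegative) value minus the number of occurrences, clamped at 0.
theorem pv_dec_items (ps : List String) (d : PySem.Dict String Int)
    (hnd : d.keys.Nodup) (hpos : ∀ kv ∈ d.items, 0 ≤ kv.2) :
    (ps.foldl pvDecStep d).items
      = d.items.map (fun kv => (kv.1, max 0 (kv.2 - (ps.count kv.1 : Int)))) := by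
  induction ps generalizing d with
  | nil =>
    simp only [List.foldl_nil, List.count_nil]
    conv_lhs => rw [← List.map_id (d.items)]
    refine List.map_congr_left (fun kv hkv => ?_)
    obtain ⟨k, v⟩ := kv
    have h0 := hpos (k, v) hkv
    simp only at h0
    exact congrArg (Prod.mk k) (by push_cast; omega)
  | cons p ps ih =>
    rw [List.foldl_cons]
    by_cases hc : (d.contains p && decide (0 < d.getD p 0)) = true
    · -- the quota at p is positive: decrement it
      rw [Bool.and_eq_true, decide_eq_true_eq] at hc
      obtain ⟨hcontains, hposgt⟩ := hc
      have hstep : pvDecStep d p = d.insert p (d.getD p 0 - 1) := by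
        simp [pvDecStep, hcontains, hposgt]
      rw [hstep]
      rw [ih (d.insert p (d.getD p 0 - 1))
            (PySem.Dict.nodup_keys_insert d p _ hnd)
            (by
              intro kv hkv
              rcases (PySem.Dict.mem_items_insert d _ _ kv).1 hkv with h | ⟨h, _⟩
              · subst h; simp only; omega
              · exact hpos kv h)]
      rw [PySem.Dict.items_insert_of_contains d _ hcontains, List.map_map]
      refine List.map_congr_left (fun kv hkv => ?_)
      obtain ⟨k, v⟩ := kv
      simp only [Function.comp]
      by_cases hk : k = p
      · subst hk
        have hv : d.getD k 0 = v := PySem.Dict.getD_of_mem_items d hkv hnd 0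
        simp only [BEq.rfl, if_pos, List.count_cons_self]
        exact congrArg (Prod.mk k) (by rw [hv]; push_cast; omega)
      · have hbeq : ((k, v).1 == p) = false := by simpa using hk
        simp only [hbeq, Bool.false_eq_true, if_false]
        rw [List.count_cons_of_ne (Ne.symm hk)]
    · -- no decrement: either p is not a key, or its quota is already 0
      have hstep : pvDecStep d p = d := by
        simp only [pvDecStep, if_neg hc]
      rw [hstep, ih d hnd hpos]
      refine List.map_congr_left (fun kv hkv => ?_)
      obtain ⟨k, v⟩ := kv
      by_cases hk : k = p
      · -- p is a key (kv witnesses it), so the quota there must be 0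
        subst hk
        have hcontains : d.contains k = true :=
          (PySem.Dict.contains_iff_mem_keys d k).2 (PySem.Dict.mem_keys_of_mem_items d hkv)
        have hv : d.getD k 0 = v := PySem.Dict.getD_of_mem_items d hkv hnd 0
        have hz : ¬(0 < d.getD k 0) := by
          intro hgt
          exact hc (by rw [Bool.and_eq_true, decide_eq_true_eq]; exact ⟨hcontains, hgt⟩)
        have h0 := hpos (k, v) hkv
        simp only at h0
        rw [List.count_cons_self]
        exact congrArg (Prod.mk k) (by rw [hv] at hz; push_cast; omega)
      · rw [List.count_cons_of_ne (Ne.symm hk)]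

-- ===== VERDICT (by name: the statement is the Claim_ definition above) =====
theorem assess_positional_needs_py_spec : Claim_equal_assess_positional_needs_py := by
  intro current_roster league_settings _
  unfold Spec_assess_positional_needs_py
  unfold assess_positional_needs_py assess_positional_needs_py_alt
  rw [← List.foldl_map (f := pvPlayerPos) (g := pvDecStep)]
  rw [pv_dec_items (current_roster.map pvPlayerPos) (PySem.Dict.ofList pvNeedsList)
        (by decide) (by decide)]
  simp only [pv_counts_getD]
  rw [PySem.Dict.items_foldl_insert_fresh
        (l := pvNeedsList) (d := PySem.Dict.empty)
        (k := fun pn : String × Int => pn.1)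
        (v := fun pn : String × Int => max 0 (pn.2 - ((current_roster.map pvPlayerPos).count pn.1 : Int)))
        (by intro a _; exact PySem.Dict.contains_empty a.1)
        (by decide)]
  rfl
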